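-- pv_equiv track=rewrite | github.com/NetaSohlberg/genome-assembly | Genome Assembly.py | findFirstRead
-- ===== SOURCE A (Python) =====
-- def findFirstRead(overlaps):
--     d={}
--     #All values in d start with 'true'.
--     for key in overlaps:
--         d[key]=True
--     #If one value (or more) at 'j' colum is higher than 2, its value in d convert to 'false'
--     for i in overlaps:
--         for j in overlaps:
--             if i!=j and overlaps[i][j]>2:
--                 d[j]=False
--     #The function return the key in d that his value is still 'true'
--     for key in overlaps:
--         if d[key]==True: return key
-- ===== SOURCE B (Python) =====
-- def findFirstRead(overlaps):
--     # Per-candidate short-circuiting scan: no auxiliary mark dict.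
--     for j in overlaps:
--         if not any(i != j and overlaps[i][j] > 2 for i in overlaps):
--             return j
--     return None
-- ===== Notes on version B (the rewrite author's own statement) =====
-- stated objective: simpler
-- what changed: B drops A's auxiliary mark-dict (init-all-True, double-loop marking, final survivor scan) and instead scans candidates in order, short-circuiting an any(...) test per candidate and returning the first clean one.
import Mathlib
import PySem

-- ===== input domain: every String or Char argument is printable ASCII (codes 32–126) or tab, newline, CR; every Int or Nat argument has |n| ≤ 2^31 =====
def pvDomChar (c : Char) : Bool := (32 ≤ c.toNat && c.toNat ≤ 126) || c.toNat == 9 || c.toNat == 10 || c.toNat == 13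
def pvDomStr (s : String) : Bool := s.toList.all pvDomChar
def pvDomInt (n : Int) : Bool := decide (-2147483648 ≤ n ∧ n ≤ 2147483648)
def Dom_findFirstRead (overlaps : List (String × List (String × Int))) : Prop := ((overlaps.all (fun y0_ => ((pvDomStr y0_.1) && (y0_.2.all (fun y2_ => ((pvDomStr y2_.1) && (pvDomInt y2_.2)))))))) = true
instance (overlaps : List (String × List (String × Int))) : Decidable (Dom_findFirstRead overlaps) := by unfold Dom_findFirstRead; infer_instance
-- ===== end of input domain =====

-- B drops A's mark-all-then-scan dict: it scans candidates in order and returns the first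
-- with no column overlap above 2 (simpler decomposition; same asymptotic cost).

-- shared lookup helper: overlaps[i][j]; exact where both keys are present (Pre_ guarantees that;
-- Python raises KeyError otherwise)
def ovVal (overlaps : List (String × List (String × Int))) (i j : String) : Int :=
  (PySem.Dict.mk ((PySem.Dict.mk overlaps).getD i [])).getD j 0

-- ===== PORT A =====
def findFirstRead (overlaps : List (String × List (String × Int))) : Option String :=
  let ks := overlaps.map (·.1)
  let d : PySem.Dict String Bool := ks.foldl (fun d key => d.insert key true) PySem.Dict.empty
  let d := ks.foldl (fun d i =>
    ks.foldl (fun d j =>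
      if i ≠ j ∧ ovVal overlaps i j > 2 then d.insert j false else d) d) d
  ks.find? (fun key => d.getD key false == true)

-- ===== PORT B =====
def findFirstRead_alt (overlaps : List (String × List (String × Int))) : Option String :=
  (overlaps.map (·.1)).find? (fun j =>
    ! (overlaps.map (·.1)).any (fun i => i != j && decide (ovVal overlaps i j > 2)))

-- ===== PRECONDITION & SPEC =====
-- Pre_ excludes (a) inputs where some inner dict lacks the key of another read, on which Python A
-- raises KeyError, and (b) association lists with duplicate outer or inner keys, which a Python
-- dict argument cannot represent (duplicates collapse, so the list order/values are accidental).
def Pre_findFirstRead (overlaps : List (String × List (String × Int))) : Prop :=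
  (overlaps.map (·.1)).Nodup ∧
  (∀ p ∈ overlaps, (p.2.map (·.1)).Nodup) ∧
  (∀ p ∈ overlaps, ∀ q ∈ overlaps, p.1 ≠ q.1 → q.1 ∈ p.2.map (·.1))
instance (overlaps : List (String × List (String × Int))) : Decidable (Pre_findFirstRead overlaps) := by
  unfold Pre_findFirstRead; infer_instance
def pvWitness_findFirstRead : (List (String × List (String × Int))) :=
  [("a", [("b", 3)]), ("b", [("a", 1)])]
def Spec_findFirstRead (overlaps : List (String × List (String × Int))) (out : Option String) : Prop := out = findFirstRead_alt overlaps
instance (overlaps : List (String × List (String × Int))) (out : Option String) : Decidable (Spec_findFirstRead overlaps out) := by unfold Spec_findFirstRead; infer_instance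

-- ===== CLAIM (what is proved, stated in full; the proofs are below) =====
def Claim_equal_findFirstRead : Prop := ∀ (overlaps : List (String × List (String × Int))), Dom_findFirstRead overlaps → Pre_findFirstRead overlaps → Spec_findFirstRead overlaps (findFirstRead overlaps)

-- ===== LEMMAS AND PROOFS =====

-- find? only looks at members, so predicates agreeing on members give the same result
theorem find?_congr_mem {α : Type} {l : List α} {p q : α → Bool}
    (h : ∀ a ∈ l, p a = q a) : l.find? p = l.find? q := by
  induction l with
  | nil => rfl
  | cons x l ih =>
    simp only [List.find?_cons, h x (List.mem_cons_self ..)]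
    cases q x
    · exact ih fun a ha => h a (List.mem_cons_of_mem _ ha)
    · rfl

-- the initial all-True dict
theorem getD_init (L : List String) (d : PySem.Dict String Bool) (k : String) (dfl : Bool) :
    (L.foldl (fun d key => d.insert key true) d).getD k dfl
      = if k ∈ L then true else d.getD k dfl := by
  induction L generalizing d with
  | nil => simp
  | cons x L ih =>
    simp only [List.foldl_cons, ih, List.mem_cons, PySem.Dict.getD_insert]
    split_ifs with h1 h2 h3 <;> simp_all

-- one inner marking pass
theorem getD_mark (L : List String) (C : String → Prop) [DecidablePred C]
    (d : PySem.Dict String Bool) (k : String) (dfl : Bool) :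
    (L.foldl (fun d j => if C j then d.insert j false else d) d).getD k dfl
      = if k ∈ L ∧ C k then false else d.getD k dfl := by
  induction L generalizing d with
  | nil => simp
  | cons x L ih =>
    simp only [List.foldl_cons, ih, List.mem_cons]
    by_cases hx : C x
    · simp only [if_pos hx, PySem.Dict.getD_insert]
      split_ifs with h1 h2 h3 <;> simp_all
    · simp only [if_neg hx]
      have heq : ((k = x ∨ k ∈ L) ∧ C k) = (k ∈ L ∧ C k) := propext
        ⟨fun ⟨hor, hc⟩ => ⟨hor.resolve_left (fun hkx => hx (hkx ▸ hc)), hc⟩,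
         fun ⟨hm, hc⟩ => ⟨Or.inr hm, hc⟩⟩
      simp only [heq]

-- the double marking loop
theorem getD_mark2 (I K : List String) (C : String → String → Prop) [∀ i j, Decidable (C i j)]
    (d : PySem.Dict String Bool) (k : String) (dfl : Bool) :
    (I.foldl (fun d i => K.foldl (fun d j => if C i j then d.insert j false else d) d) d).getD k dfl
      = if ∃ i ∈ I, k ∈ K ∧ C i k then false else d.getD k dfl := by
  induction I generalizing d with
  | nil => simp
  | cons x I ih =>
    simp only [List.foldl_cons, ih, getD_mark, List.exists_mem_cons_iff]
    by_cases h1 : ∃ i ∈ I, k ∈ K ∧ C i k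
    · simp only [if_pos h1, if_pos (Or.inr h1)]
    · by_cases h3 : k ∈ K ∧ C x k
      · simp only [if_neg h1, if_pos h3, if_pos (Or.inl h3)]
      · simp only [if_neg h1, if_neg h3, if_neg (fun h => Or.elim h h3 h1)]

-- ===== VERDICT (by name: the statement is the Claim_ definition above) =====
theorem findFirstRead_spec : Claim_equal_findFirstRead := by
  intro overlaps _ _
  unfold Spec_findFirstRead findFirstRead findFirstRead_alt
  apply find?_congr_mem
  intro k hk
  simp only [getD_mark2, getD_init, PySem.Dict.getD_empty]
  by_cases h : ∃ i ∈ overlaps.map (·.1), i ≠ k ∧ ovVal overlaps i k > 2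
  · obtain ⟨i, hi, hik, hv⟩ := h
    rw [if_pos ⟨i, hi, hk, hik, hv⟩]
    have hany : ((overlaps.map (·.1)).any (fun i => i != k && decide (ovVal overlaps i k > 2))) = true :=
      List.any_eq_true.mpr ⟨i, hi, by simp [hik, hv]⟩
    simp [hany]
  · rw [if_neg (by rintro ⟨i, hi, -, hik, hv⟩; exact h ⟨i, hi, hik, hv⟩), if_pos hk]
    have hany : ((overlaps.map (·.1)).any (fun i => i != k && decide (ovVal overlaps i k > 2))) = false := by
      refine List.any_eq_false.mpr fun i hi => ?_
      by_cases hik : i = k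
      · simp [hik]
      · have hv : ¬ ovVal overlaps i k > 2 := fun hv => h ⟨i, hi, hik, hv⟩
        simp [hv]
    simp [hany]
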